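-- pv_equiv track=rewrite | github.com/Szilard7593/AP_Lab5 | Lab5.py | subsecventa_7
-- ===== SOURCE A (Python) =====
-- def estePrim(p): #Functie ajutatoare pentru a putea afla subsecventa cu o anumita prorprietate
--     if p < 2:
--         return False
--     for i in range(2,p): #cel mai eficient ar sa ma merge pana la (sqrt(n)+1)
--         if p % i == 0:
--             return False
--     return True
--
-- def diferaprinnumarprim(p,q):
--     prim = abs(p-q)
--     return estePrim(prim)
--
-- def subsecventa_7(lista):
--     p,l = -1,0
--     pmax,lmax = -1,0
--     for i in range(len(lista)):
--         if diferaprinnumarprim(lista[i-1],lista[i]):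
--             if l == 0:
--                 p = i - 1
--                 l = 2
--             else:
--                 l += 1
--             if l > lmax:
--                 lmax = l
--                 pmax = p
--         else:
--             l = 0
--     return pmax,lmax
-- ===== SOURCE B (Python) =====
-- def estePrim(p):
--     if p < 2:
--         return False
--     for i in range(2, p):
--         if p % i == 0:
--             return False
--     return True
--
-- def diferaprinnumarprim(p, q):
--     prim = abs(p - q)
--     return estePrim(prim)
--
-- def subsecventa_7(lista):
--     # Precompute the prime-difference match table once, then scan it for the
--     # earliest longest run of consecutive True values.
--     n = len(lista)
--     match = [diferaprinnumarprim(lista[i - 1], lista[i]) for i in range(n)]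
--     best = (-1, 0)  # (start position, length)
--     i = 0
--     while i < n:
--         if match[i]:
--             j = i + 1
--             while j < n and match[j]:
--                 j += 1
--             run = j - i + 1
--             if run > best[1]:
--                 best = (i - 1, run)
--             i = j
--         else:
--             i += 1
--     return best
-- ===== Notes on version B (the rewrite author's own statement) =====
-- stated objective: alternative
-- what changed: B precomputes the boolean match table in one pass and then finds the earliest longest run of consecutive Trues with a two-level run scan, instead of A's single fold that threads the (p,l,pmax,lmax) state element by element.
import Mathlib
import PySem

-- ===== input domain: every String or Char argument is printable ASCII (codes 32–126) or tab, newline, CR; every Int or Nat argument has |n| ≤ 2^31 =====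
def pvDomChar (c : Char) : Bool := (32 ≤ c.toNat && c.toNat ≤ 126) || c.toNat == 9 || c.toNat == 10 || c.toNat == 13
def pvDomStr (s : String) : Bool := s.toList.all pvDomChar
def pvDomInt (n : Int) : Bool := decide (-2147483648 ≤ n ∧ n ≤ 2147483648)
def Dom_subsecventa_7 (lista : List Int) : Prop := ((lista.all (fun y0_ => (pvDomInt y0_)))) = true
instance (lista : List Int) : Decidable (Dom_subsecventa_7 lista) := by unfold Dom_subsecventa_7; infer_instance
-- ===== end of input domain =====

-- B changes the decomposition (precomputed match table + longest-run scan) instead of A's single stateful fold; same asymptotic cost.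

-- ===== PORT A =====
-- shared helpers (identical in Source A and Source B)
-- the `for i in range(2, p)` loop with its early `return False`
def estePrimLoop (p i : Int) : Bool :=
  if h : i < p then
    if PySem.Int.mod p i == 0 then false else estePrimLoop p (i + 1)
  else true
termination_by (p - i).toNat
decreasing_by omega

def estePrim (p : Int) : Bool :=
  if p < 2 then false
  else estePrimLoop p 2

def diferaprinnumarprim (p q : Int) : Bool :=
  estePrim |p - q|

-- the loop indices i and i-1 are always in range (i-1 = -1 wraps to the last element), so the default 0 of pyGetD is never used
def subsecventa_7 (lista : List Int) : Int × Int :=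
  let st := (PySem.List.pyRange 0 (lista.length : Int) 1).foldl
    (fun (st : (Int × Int) × (Int × Int)) i =>
      let ((p, l), (pmax, lmax)) := st
      if diferaprinnumarprim (PySem.List.pyGetD lista (i - 1) 0) (PySem.List.pyGetD lista i 0) then
        let (p, l) := if l == 0 then (i - 1, (2 : Int)) else (p, l + 1)
        if l > lmax then ((p, l), (p, l)) else ((p, l), (pmax, lmax))
      else ((p, 0), (pmax, lmax)))
    ((-1, 0), (-1, 0))
  st.2

-- ===== PORT B =====
def matchTable (lista : List Int) : List Bool :=
  (PySem.List.pyRange 0 (lista.length : Int) 1).map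
    (fun i => diferaprinnumarprim (PySem.List.pyGetD lista (i - 1) 0) (PySem.List.pyGetD lista i 0))

-- consume the leading run of `true`s (the inner `while j < n and match[j]` loop of Source B)
def takeRun : List Bool → Nat × List Bool
  | true :: rest => let (c, r) := takeRun rest; (c + 1, r)
  | ms => (0, ms)

theorem takeRun_snd_length_le : ∀ ms : List Bool, (takeRun ms).2.length ≤ ms.length := by
  intro ms
  induction ms with
  | nil => simp [takeRun]
  | cons b rest ih =>
    cases b
    · simp [takeRun]
    · simp [takeRun]; omega

-- the outer `while i < n` loop of Source B
def runScan : List Bool → Int → Int × Int → Int × Int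
  | [], _, best => best
  | false :: rest, idx, best => runScan rest (idx + 1) best
  | true :: rest, idx, best =>
    let c := (takeRun rest).1
    let rest' := (takeRun rest).2
    let run : Int := (c : Int) + 2
    let best' := if run > best.2 then (idx - 1, run) else best
    runScan rest' (idx + (c : Int) + 1) best'
termination_by ms => ms.length
decreasing_by
  · simp
  · have h := takeRun_snd_length_le rest
    simp; omega

def subsecventa_7_alt (lista : List Int) : Int × Int :=
  runScan (matchTable lista) 0 (-1, 0)

-- ===== PRECONDITION & SPEC =====
def Spec_subsecventa_7 (lista : List Int) (out : Int × Int) : Prop := out = subsecventa_7_alt lista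
instance (lista : List Int) (out : Int × Int) : Decidable (Spec_subsecventa_7 lista out) := by unfold Spec_subsecventa_7; infer_instance

-- ===== CLAIM (what is proved, stated in full; the proofs are below) =====
def Claim_equal_subsecventa_7 : Prop := ∀ (lista : List Int), Dom_subsecventa_7 lista → Spec_subsecventa_7 lista (subsecventa_7 lista)

-- ===== LEMMAS AND PROOFS =====

-- A's loop step, as a function of the current index and the match bit
def stepA (st : (Int × Int) × (Int × Int)) (i : Int) (m : Bool) : (Int × Int) × (Int × Int) :=
  let ((p, l), (pmax, lmax)) := st
  if m then
    let (p, l) := if l == 0 then (i - 1, (2 : Int)) else (p, l + 1)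
    if l > lmax then ((p, l), (p, l)) else ((p, l), (pmax, lmax))
  else ((p, 0), (pmax, lmax))

-- A's fold rephrased as structural recursion over the list of match bits, carrying the index
def loopIdx : List Bool → Int → (Int × Int) × (Int × Int) → (Int × Int) × (Int × Int)
  | [], _, st => st
  | m :: ms, idx, st => loopIdx ms (idx + 1) (stepA st idx m)

theorem foldl_pyRange_eq_loopIdx (f : Int → Bool) :
    ∀ (k : Nat) (a : Int) (st : (Int × Int) × (Int × Int)),
      (PySem.List.pyRange a (a + k) 1).foldl (fun st i => stepA st i (f i)) st =
      loopIdx ((PySem.List.pyRange a (a + k) 1).map f) a st := by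
  intro k
  induction k with
  | zero => intro a st; simp [PySem.List.pyRange_one_eq_nil, loopIdx]
  | succ n ih =>
    intro a st
    have hlt : a < a + ((n + 1 : Nat) : Int) := by push_cast; omega
    rw [PySem.List.pyRange_one_cons hlt]
    have he : a + ((n + 1 : Nat) : Int) = (a + 1) + (n : Nat) := by push_cast; ring
    simp only [List.foldl_cons, List.map_cons, loopIdx, he, ih]

theorem takeRun_spec : ∀ ms : List Bool,
    ms = List.replicate (takeRun ms).1 true ++ (takeRun ms).2 ∧
    ((takeRun ms).2 = [] ∨ ∃ t, (takeRun ms).2 = false :: t) := by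
  intro ms
  induction ms with
  | nil => simp [takeRun]
  | cons b rest ih =>
    cases b
    · exact ⟨by simp [takeRun], Or.inr ⟨rest, by simp [takeRun]⟩⟩
    · obtain ⟨h1, h2⟩ := ih
      refine ⟨?_, by simpa only [takeRun] using h2⟩
      simp only [takeRun, List.replicate_succ, List.cons_append, List.cons.injEq]
      exact ⟨trivial, h1⟩

-- L1: processing c further matches from an in-run state (l ≥ 2, best already accounts for l)
theorem loopIdx_run :
    ∀ (c : Nat) (rest : List Bool) (idx p l pmax lmax : Int), 2 ≤ l → l ≤ lmax →
      loopIdx (List.replicate c true ++ rest) idx ((p, l), (pmax, lmax)) =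
      loopIdx rest (idx + c)
        ((p, l + c), (if l + (c : Int) > lmax then (p, l + c) else (pmax, lmax))) := by
  intro c
  induction c with
  | zero =>
    intro rest idx p l pmax lmax hl hle
    simp only [List.replicate_zero, List.nil_append, Nat.cast_zero, add_zero]
    rw [if_neg (by omega)]
  | succ n ih =>
    intro rest idx p l pmax lmax hl hle
    have hne : (l == 0) = false := by simp; omega
    rw [List.replicate_succ, List.cons_append]
    simp only [loopIdx, stepA, if_true, hne, Bool.false_eq_true, if_false]
    by_cases hgt : l + 1 > lmax
    · simp only [if_pos hgt]
      rw [ih rest (idx + 1) p (l + 1) p (l + 1) (by omega) (by omega)]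
      have he1 : idx + 1 + (n : Int) = idx + ((n + 1 : Nat) : Int) := by push_cast; ring
      have he2 : l + 1 + (n : Int) = l + ((n + 1 : Nat) : Int) := by push_cast; ring
      rw [he1, he2]
      congr 1
      have h2 : l + ((n + 1 : Nat) : Int) > lmax := by push_cast; omega
      rw [if_pos h2]
      by_cases hn0 : n = 0
      · subst hn0
        rw [if_neg (by push_cast; omega)]
        norm_num
      · rw [if_pos (by push_cast; omega)]
    · simp only [if_neg hgt]
      rw [ih rest (idx + 1) p (l + 1) pmax lmax (by omega) (by omega)]
      have he1 : idx + 1 + (n : Int) = idx + ((n + 1 : Nat) : Int) := by push_cast; ring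
      have he2 : l + 1 + (n : Int) = l + ((n + 1 : Nat) : Int) := by push_cast; ring
      rw [he1, he2]

-- a fresh match from a not-in-run state followed by the rest of the run
theorem loopIdx_true :
    ∀ (c : Nat) (rest' : List Bool) (idx p pmax lmax : Int),
      loopIdx (true :: (List.replicate c true ++ rest')) idx ((p, 0), (pmax, lmax)) =
      loopIdx rest' (idx + (c : Int) + 1)
        ((idx - 1, (c : Int) + 2),
         (if (c : Int) + 2 > lmax then (idx - 1, (c : Int) + 2) else (pmax, lmax))) := by
  intro c rest' idx p pmax lmax
  simp only [loopIdx, stepA, if_true]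
  have h0 : ((0 : Int) == 0) = true := by decide
  simp only [h0, if_true]
  by_cases hgt : (2 : Int) > lmax
  · simp only [if_pos hgt]
    rw [loopIdx_run c rest' (idx + 1) (idx - 1) 2 (idx - 1) 2 (by omega) (by omega)]
    have hbig : (c : Int) + 2 > lmax := by omega
    have he1 : idx + 1 + (c : Int) = idx + (c : Int) + 1 := by ring
    have he2 : (2 : Int) + (c : Int) = (c : Int) + 2 := by ring
    rw [he1, he2]
    congr 1
    by_cases hc : (c : Int) + 2 > 2
    · simp [hc, hbig]
    · have hc0 : (c : Int) = 0 := by omega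
      simp [hc0]
      omega
  · simp only [if_neg hgt]
    rw [loopIdx_run c rest' (idx + 1) (idx - 1) 2 pmax lmax (by omega) (by omega)]
    have he1 : idx + 1 + (c : Int) = idx + (c : Int) + 1 := by ring
    have he2 : (2 : Int) + (c : Int) = (c : Int) + 2 := by ring
    rw [he1, he2]

-- L2: from a not-in-run state (l = 0), A's loop computes exactly B's run scan
theorem loopIdx_eq_runScan :
    ∀ (n : Nat) (ms : List Bool), ms.length ≤ n → ∀ (idx p pmax lmax : Int),
      (loopIdx ms idx ((p, 0), (pmax, lmax))).2 = runScan ms idx (pmax, lmax) := by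
  intro n
  induction n with
  | zero =>
    intro ms hms idx p pmax lmax
    have h : ms = [] := by cases ms <;> simp_all
    subst h; simp [loopIdx, runScan]
  | succ k ih =>
    intro ms hms idx p pmax lmax
    match ms with
    | [] => simp [loopIdx, runScan]
    | false :: rest =>
      simp only [loopIdx, stepA, Bool.false_eq_true, if_false]
      rw [runScan]
      exact ih rest (by simp at hms; omega) (idx + 1) p pmax lmax
    | true :: rest =>
      obtain ⟨hsplit, hhead⟩ := takeRun_spec rest
      have hclen := takeRun_snd_length_le rest
      have htr : takeRun rest = ((takeRun rest).1, (takeRun rest).2) := rfl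
      set c := (takeRun rest).1 with hc
      set rest' := (takeRun rest).2 with hr
      have hlhs : loopIdx (true :: rest) idx ((p, 0), (pmax, lmax)) =
          loopIdx rest' (idx + (c : Int) + 1)
            ((idx - 1, (c : Int) + 2),
             (if (c : Int) + 2 > lmax then (idx - 1, (c : Int) + 2) else (pmax, lmax))) := by
        conv_lhs => rw [hsplit]
        exact loopIdx_true c rest' idx p pmax lmax
      have hrhs : runScan (true :: rest) idx (pmax, lmax) =
          runScan rest' (idx + (c : Int) + 1)
            (if (c : Int) + 2 > lmax then (idx - 1, (c : Int) + 2) else (pmax, lmax)) := by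
        rw [runScan, htr]
      rw [hlhs, hrhs]
      rcases hhead with h0 | ⟨t, h0⟩
      · rw [h0]; simp [loopIdx, runScan]
      · rw [h0]
        have hlen : t.length ≤ k := by
          have hre : rest.length = c + rest'.length := by rw [hsplit]; simp
          simp at hms
          rw [h0] at hre
          simp at hre
          omega
        simp only [loopIdx, stepA, Bool.false_eq_true, if_false]
        rw [runScan]
        by_cases hcase : (c : Int) + 2 > lmax
        · simp only [if_pos hcase]
          exact ih t hlen (idx + (c : Int) + 1 + 1) (idx - 1) (idx - 1) ((c : Int) + 2)
        · simp only [if_neg hcase]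
          exact ih t hlen (idx + (c : Int) + 1 + 1) (idx - 1) pmax lmax

-- ===== VERDICT (by name: the statement is the Claim_ definition above) =====
theorem subsecventa_7_spec : Claim_equal_subsecventa_7 := by
  intro lista _
  show subsecventa_7 lista = subsecventa_7_alt lista
  have h1 : subsecventa_7 lista =
      ((PySem.List.pyRange 0 (lista.length : Int) 1).foldl
        (fun st i => stepA st i
          (diferaprinnumarprim (PySem.List.pyGetD lista (i - 1) 0) (PySem.List.pyGetD lista i 0)))
        ((-1, 0), (-1, 0))).2 := rfl
  have h2 : subsecventa_7_alt lista =
      runScan ((PySem.List.pyRange 0 (lista.length : Int) 1).map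
        (fun i => diferaprinnumarprim (PySem.List.pyGetD lista (i - 1) 0) (PySem.List.pyGetD lista i 0)))
        0 (-1, 0) := rfl
  rw [h1, h2]
  have hz : ((lista.length : Int)) = (0 : Int) + (lista.length : Nat) := by ring
  rw [hz, foldl_pyRange_eq_loopIdx]
  exact loopIdx_eq_runScan lista.length _
    (by simp [PySem.List.length_pyRange_one]) 0 (-1) (-1) 0
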